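-- pv_equiv track=rewrite | github.com/DKanyana/PythonProblems | 9_ZipAllTuples.py | zipmax_tups
-- ===== SOURCE A (Python) =====
-- def zipmax_tups(num1,num2):
--     num1_index = 0
--     num2_index = 0
--     max_len = max(len(num1),len(num2))
--     zip_index = 0
--     zip_list =[]
--     tup1 = 0
--     tup2 = 0
--
--     while zip_index < max_len:
--         isnum1_empty = num1_index >=len(num1)
--         isnum2_empty = num2_index >=len(num2)
--
--         if isnum1_empty:
--             tup1 = 0
--             tup2 = num2[num2_index]
--         elif isnum2_empty:
--             tup1 = num1[num1_index]
--             tup2 = 0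
--         else:
--             tup1 = num1[num1_index]
--             tup2 = num2[num2_index]
--
--         zip_list.append((tup1,tup2))
--         num1_index +=1
--         num2_index +=1
--         zip_index +=1
--
--     return zip_list
-- ===== SOURCE B (Python) =====
-- def zipmax_tups(num1, num2):
--     max_len = max(len(num1), len(num2))
--     p1 = num1 + [0] * (max_len - len(num1))
--     p2 = num2 + [0] * (max_len - len(num2))
--     return list(zip(p1, p2))
-- ===== Notes on version B (the rewrite author's own statement) =====
-- stated objective: simpler
-- what changed: Replaces the index-driven while loop with per-element exhaustion branching by a normalize-then-combine shape: pad both lists with zeros to the common length up front, then one uniform zip; the C-level zip/list building removes the per-element Python branching and indexing.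
import Mathlib
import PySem

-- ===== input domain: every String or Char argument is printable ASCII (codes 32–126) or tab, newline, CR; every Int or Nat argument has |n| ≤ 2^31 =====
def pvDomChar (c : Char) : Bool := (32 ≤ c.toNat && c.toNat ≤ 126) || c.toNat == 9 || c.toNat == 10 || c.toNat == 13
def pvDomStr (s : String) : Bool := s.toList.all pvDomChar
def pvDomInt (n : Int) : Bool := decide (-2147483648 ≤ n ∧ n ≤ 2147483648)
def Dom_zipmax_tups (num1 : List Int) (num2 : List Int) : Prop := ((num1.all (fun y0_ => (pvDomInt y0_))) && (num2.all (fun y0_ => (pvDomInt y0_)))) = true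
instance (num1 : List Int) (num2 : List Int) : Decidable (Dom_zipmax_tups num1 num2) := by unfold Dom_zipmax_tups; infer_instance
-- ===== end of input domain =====

-- B pads both lists with zeros to the common length and zips once, replacing A's per-element exhaustion branching (objective: simpler).


-- ===== PORT A =====
-- A keeps three indices that always advance together, so the loop is a fold over
-- range(0, max_len) with the loop counter as the single index.  The list indexings
-- num1[i] / num2[i] happen only in branches where i is in range, so pyGetD is exact there.
def zipmax_tups (num1 : List Int) (num2 : List Int) : List (Int × Int) :=
  let maxLen : Int := max (num1.length : Int) (num2.length : Int)
  (PySem.List.pyRange 0 maxLen 1).foldl (fun zipList i =>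
    let isnum1Empty : Bool := decide ((num1.length : Int) ≤ i)
    let isnum2Empty : Bool := decide ((num2.length : Int) ≤ i)
    let t : Int × Int :=
      if isnum1Empty then (0, PySem.List.pyGetD num2 i 0)
      else if isnum2Empty then (PySem.List.pyGetD num1 i 0, 0)
      else (PySem.List.pyGetD num1 i 0, PySem.List.pyGetD num2 i 0)
    zipList ++ [t]) []

-- ===== PORT B =====
def zipmax_tups_alt (num1 : List Int) (num2 : List Int) : List (Int × Int) :=
  let maxLen := max num1.length num2.length
  let p1 := num1 ++ List.replicate (maxLen - num1.length) 0
  let p2 := num2 ++ List.replicate (maxLen - num2.length) 0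
  p1.zip p2

-- ===== PRECONDITION & SPEC =====
def Spec_zipmax_tups (num1 : List Int) (num2 : List Int) (out : List (Int × Int)) : Prop := out = zipmax_tups_alt num1 num2
instance (num1 : List Int) (num2 : List Int) (out : List (Int × Int)) : Decidable (Spec_zipmax_tups num1 num2 out) := by unfold Spec_zipmax_tups; infer_instance

-- ===== CLAIM (what is proved, stated in full; the proofs are below) =====
def Claim_equal_zipmax_tups : Prop := ∀ (num1 : List Int) (num2 : List Int), Dom_zipmax_tups num1 num2 → Spec_zipmax_tups num1 num2 (zipmax_tups num1 num2)

-- ===== LEMMAS AND PROOFS =====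

-- the padded list reads as the original below its length and 0 above it
theorem pad_getElem (xs : List Int) (n k : ℕ) (hk : k < xs.length + (n - xs.length)) :
    (xs ++ List.replicate (n - xs.length) (0 : Int))[k]'(by simpa using hk) =
      if h : k < xs.length then xs[k] else 0 := by
  split_ifs with h
  · exact List.getElem_append_left h
  · rw [List.getElem_append_right (le_of_not_gt h)]
    exact List.getElem_replicate _

-- ===== VERDICT (by name: the statement is the Claim_ definition above) =====
theorem zipmax_tups_spec : Claim_equal_zipmax_tups := by
  intro num1 num2 _
  unfold Spec_zipmax_tups zipmax_tups zipmax_tups_alt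
  rw [PySem.List.foldl_append_singleton_eq_map, PySem.List.pyRange_one]
  simp only [List.nil_append, List.map_map, sub_zero]
  apply List.ext_getElem
  · simp only [List.length_map, List.length_range, List.length_zip, List.length_append,
      List.length_replicate]
    omega
  · intro k h1 h2
    have hk : k < max num1.length num2.length := by
      simp only [List.length_map, List.length_range] at h1
      omega
    simp only [List.getElem_map, List.getElem_range, Function.comp_apply, zero_add,
      List.getElem_zip]
    rw [pad_getElem num1 (max num1.length num2.length) k (by omega),
        pad_getElem num2 (max num1.length num2.length) k (by omega)]
    have g1 : PySem.List.pyGetD num1 (k : Int) 0 = if h : k < num1.length then num1[k] else 0 := by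
      split_ifs with h
      · simp [PySem.List.pyGetD_natCast, List.getElem?_eq_getElem h]
      · simp [PySem.List.pyGetD_natCast, List.getElem?_eq_none (le_of_not_gt h)]
    have g2 : PySem.List.pyGetD num2 (k : Int) 0 = if h : k < num2.length then num2[k] else 0 := by
      split_ifs with h
      · simp [PySem.List.pyGetD_natCast, List.getElem?_eq_getElem h]
      · simp [PySem.List.pyGetD_natCast, List.getElem?_eq_none (le_of_not_gt h)]
    have c1 : ((num1.length : Int) ≤ (k : Int)) ↔ num1.length ≤ k := by exact_mod_cast Iff.rfl
    have c2 : ((num2.length : Int) ≤ (k : Int)) ↔ num2.length ≤ k := by exact_mod_cast Iff.rfl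
    by_cases h1e : num1.length ≤ k <;> by_cases h2e : num2.length ≤ k <;>
      simp [c1, c2, h1e, h2e, g1, g2]
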